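-- pv_equiv track=rewrite | github.com/tanimutomo/atcoder | abc/169/d.py | div_count
-- ===== SOURCE A (Python) =====
-- def div_count(primes: dict) -> int:
--     cnt = 0
--     for _, c in primes.items():
--         i = 1
--         while True:
--             if c < i:
--                 break
--             cnt += 1
--             c -= i
--             i += 1
--
--     return cnt
-- ===== SOURCE B (Python) =====
-- def div_count(primes: dict) -> int:
--     # Binary search per exponent for the largest k with k*(k+1)//2 <= c,
--     # instead of A's linear subtraction loop (alternative algorithm).
--     total = 0
--     for c in primes.values():
--         if c > 0:
--             lo, hi = 0, c + 1          # invariant: T(lo) <= c < T(hi)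
--             while hi - lo > 1:
--                 mid = (lo + hi) // 2
--                 if mid * (mid + 1) // 2 <= c:
--                     lo = mid
--                 else:
--                     hi = mid
--             total += lo
--     return total
-- ===== Notes on version B (the rewrite author's own statement) =====
-- stated objective: alternative
-- what changed: A finds each exponent's maximal triangular index by subtracting 1,2,3,... until it cannot; B binary-searches the largest k with k(k+1)/2 <= c directly.
import Mathlib
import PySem

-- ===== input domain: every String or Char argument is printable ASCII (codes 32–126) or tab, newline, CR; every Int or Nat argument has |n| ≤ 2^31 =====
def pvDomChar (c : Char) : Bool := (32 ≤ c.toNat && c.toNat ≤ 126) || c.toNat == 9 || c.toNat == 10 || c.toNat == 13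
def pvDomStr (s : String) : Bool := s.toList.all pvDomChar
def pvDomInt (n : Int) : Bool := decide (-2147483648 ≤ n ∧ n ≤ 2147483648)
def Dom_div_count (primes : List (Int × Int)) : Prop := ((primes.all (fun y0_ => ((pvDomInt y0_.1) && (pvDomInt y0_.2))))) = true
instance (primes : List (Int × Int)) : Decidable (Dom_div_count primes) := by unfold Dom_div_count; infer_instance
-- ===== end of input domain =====

-- B replaces A's linear subtraction loop per exponent by a binary search for the
-- largest k with k(k+1)/2 ≤ c (objective: alternative algorithm, same result).

-- ===== PORT A =====
-- A's inner while loop; the Python variable i (always ≥ 1) is carried as j with i = j+1.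
def aLoop (c : Int) (j : Nat) : Int :=
  if c < (j : Int) + 1 then 0
  else 1 + aLoop (c - ((j : Int) + 1)) (j + 1)
termination_by c.toNat
decreasing_by
  rename_i h
  simp only [not_lt] at h
  omega

def div_count (primes : List (Int × Int)) : Int :=
  primes.foldl (fun cnt pc => cnt + aLoop pc.2 0) 0

-- ===== PORT B =====
-- B's inner while loop: binary search, invariant T(lo) ≤ c < T(hi).
def bLoop (c lo hi : Int) : Int :=
  if hi - lo > 1 then
    let mid := PySem.Int.floordiv (lo + hi) 2
    if PySem.Int.floordiv (mid * (mid + 1)) 2 ≤ c then bLoop c mid hi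
    else bLoop c lo mid
  else lo
termination_by (hi - lo).toNat
decreasing_by
  · rename_i h _
    have h2 := Int.mul_ediv_add_emod (lo + hi) 2
    have h3 := Int.emod_nonneg (lo + hi) (by norm_num : (2:Int) ≠ 0)
    have h4 := Int.emod_lt_of_pos (lo + hi) (by norm_num : (0:Int) < 2)
    simp only [PySem.Int.floordiv, Int.fdiv_eq_ediv] at *
    omega
  · rename_i h _
    have h2 := Int.mul_ediv_add_emod (lo + hi) 2
    have h3 := Int.emod_nonneg (lo + hi) (by norm_num : (2:Int) ≠ 0)
    have h4 := Int.emod_lt_of_pos (lo + hi) (by norm_num : (0:Int) < 2)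
    simp only [PySem.Int.floordiv, Int.fdiv_eq_ediv] at *
    omega

def div_count_alt (primes : List (Int × Int)) : Int :=
  primes.foldl (fun total pc => if pc.2 > 0 then total + bLoop pc.2 0 (pc.2 + 1) else total) 0

-- ===== PRECONDITION & SPEC =====
def Spec_div_count (primes : List (Int × Int)) (out : Int) : Prop := out = div_count_alt primes
instance (primes : List (Int × Int)) (out : Int) : Decidable (Spec_div_count primes out) := by unfold Spec_div_count; infer_instance

-- ===== CLAIM (what is proved, stated in full; the proofs are below) =====
def Claim_equal_div_count : Prop := ∀ (primes : List (Int × Int)), Dom_div_count primes → Spec_div_count primes (div_count primes)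

-- ===== LEMMAS AND PROOFS =====

-- triangular numbers as an Int-valued recursion
def tri : Nat → Int
  | 0 => 0
  | k + 1 => tri k + (k + 1)

theorem tri_mono {a b : Nat} (h : a ≤ b) : tri a ≤ tri b := by
  induction b with
  | zero => simp_all
  | succ b ih =>
    rcases Nat.lt_or_ge a (b+1) with h' | h'
    · have := ih (by omega); simp only [tri]; push_cast; omega
    · have : a = b + 1 := by omega
      subst this; exact le_rfl

theorem ge_tri (k : Nat) : (k : Int) ≤ tri k := by
  induction k with
  | zero => simp [tri]
  | succ k ih => simp only [tri]; push_cast; omega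

theorem two_mul_tri (k : Nat) : (k : Int) * (k + 1) = 2 * tri k := by
  induction k with
  | zero => simp [tri]
  | succ k ih => simp only [tri]; push_cast at *; ring_nf; ring_nf at ih; nlinarith

-- the test A/B compute: for m ≥ 0, m*(m+1)//2 = tri m.toNat
theorem floordiv_tri (m : Int) (hm : 0 ≤ m) :
    PySem.Int.floordiv (m * (m + 1)) 2 = tri m.toNat := by
  have h1 : m = (m.toNat : Int) := by omega
  rw [h1, two_mul_tri]
  simp only [PySem.Int.floordiv]
  rw [Int.mul_fdiv_cancel_left _ (by norm_num : (2:Int) ≠ 0)]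
  congr 1

-- characterisation of A's loop: it returns the maximal count
theorem aLoop_spec (n : Nat) : ∀ (c : Int) (j : Nat), c.toNat = n → 0 ≤ c →
    ∃ k : Nat, aLoop c j = (k : Int) ∧
      (k : Int) * j + tri k ≤ c ∧ c < ((k : Int) + 1) * j + tri (k + 1) := by
  induction n using Nat.strong_induction_on with
  | _ n ih =>
    intro c j hn hc
    rw [aLoop]
    split
    · rename_i h
      refine ⟨0, by simp, ?_, ?_⟩
      · simp [tri]; omega
      · simp only [tri]; push_cast; omega
    · rename_i h
      simp only [not_lt] at h
      have hc' : 0 ≤ c - ((j : Int) + 1) := by omega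
      obtain ⟨k, hk, hlo, hhi⟩ := ih (c - ((j:Int)+1)).toNat (by omega) (c - ((j:Int)+1)) (j+1) rfl hc'
      refine ⟨k + 1, by rw [hk]; push_cast; ring, ?_, ?_⟩
      · simp only [tri]; push_cast at *; nlinarith
      · simp only [tri] at *; push_cast at *; nlinarith

-- characterisation of B's loop under its invariant
theorem bLoop_spec (n : Nat) : ∀ (c lo hi : Int), (hi - lo).toNat = n →
    0 ≤ lo → lo < hi → tri lo.toNat ≤ c → c < tri hi.toNat →
    ∃ k : Nat, bLoop c lo hi = (k : Int) ∧ tri k ≤ c ∧ c < tri (k + 1) := by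
  induction n using Nat.strong_induction_on with
  | _ n ih =>
    intro c lo hi hn h0 hlh hlo hhi
    rw [bLoop]
    split
    · rename_i hgt
      have h2 := Int.mul_ediv_add_emod (lo + hi) 2
      have h3 := Int.emod_nonneg (lo + hi) (by norm_num : (2:Int) ≠ 0)
      have h4 := Int.emod_lt_of_pos (lo + hi) (by norm_num : (0:Int) < 2)
      set mid := PySem.Int.floordiv (lo + hi) 2 with hmid
      have hmid' : mid = (lo + hi) / 2 := by
        simp [hmid, PySem.Int.floordiv, Int.fdiv_eq_ediv]
      have hmlo : lo < mid := by omega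
      have hmhi : mid < hi := by omega
      have hm0 : 0 ≤ mid := by omega
      show ∃ k : Nat, (if PySem.Int.floordiv (mid * (mid + 1)) 2 ≤ c then bLoop c mid hi
        else bLoop c lo mid) = (k : Int) ∧ tri k ≤ c ∧ c < tri (k + 1)
      rw [floordiv_tri mid hm0]
      split
      · rename_i hle
        exact ih (hi - mid).toNat (by omega) c mid hi rfl hm0 hmhi hle hhi
      · rename_i hgt'
        simp only [not_le] at hgt'
        exact ih (mid - lo).toNat (by omega) c lo mid rfl h0 hmlo hlo (by exact hgt')
    · rename_i hle
      simp only [not_lt] at hle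
      have : hi = lo + 1 := by omega
      subst this
      refine ⟨lo.toNat, by omega, hlo, ?_⟩
      have : (lo + 1).toNat = lo.toNat + 1 := by omega
      rw [this] at hhi
      exact hhi

-- per-element equality
theorem elem_eq (c : Int) : aLoop c 0 = (if c > 0 then bLoop c 0 (c + 1) else 0) := by
  split
  · rename_i hc
    obtain ⟨k, hk, hlo, hhi⟩ := aLoop_spec c.toNat c 0 rfl (by omega)
    simp only [Nat.cast_zero, mul_zero, zero_add, add_zero] at hlo hhi
    obtain ⟨k', hk', hlo', hhi'⟩ := bLoop_spec (c + 1 - 0).toNat c 0 (c+1) rfl le_rfl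
      (by omega) (by simp [tri]; omega)
      (by
        have h1 : (c + 1).toNat = c.toNat + 1 := by omega
        rw [h1]
        have := ge_tri (c.toNat + 1)
        omega)
    rw [hk, hk']
    -- uniqueness of k with tri k ≤ c < tri (k+1)
    norm_cast
    by_contra hne
    rcases Nat.lt_or_ge k k' with h | h
    · have := tri_mono (show k + 1 ≤ k' by omega); omega
    · have hk'' : k' < k := by omega
      have := tri_mono (show k' + 1 ≤ k by omega); omega
  · rename_i hc
    rw [aLoop]
    simp only [Nat.cast_zero, zero_add]
    rw [if_pos (by omega)]

-- fold equality
theorem fold_eq (primes : List (Int × Int)) : ∀ (a b : Int), a = b →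
    primes.foldl (fun cnt pc => cnt + aLoop pc.2 0) a
      = primes.foldl (fun total pc => if pc.2 > 0 then total + bLoop pc.2 0 (pc.2 + 1) else total) b := by
  induction primes with
  | nil => intro a b h; simpa
  | cons p ps ih =>
    intro a b h
    simp only [List.foldl_cons]
    apply ih
    rw [h, elem_eq]
    split <;> simp

-- ===== VERDICT (by name: the statement is the Claim_ definition above) =====
theorem div_count_spec : Claim_equal_div_count := by
  intro primes _
  show div_count primes = div_count_alt primes
  exact fold_eq primes 0 0 rfl
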